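-- pv_equiv track=rewrite | github.com/omeedmo/InvestmentAnalysis | app.py | get_display_quarters
-- ===== SOURCE A (Python) =====
-- def get_display_quarters(financials: dict) -> list[str]:
--     """Return Q-prefixed keys that have at least 3 metrics populated."""
--     q_counts: dict[str, int] = {}
--     for series in financials.values():
--         for d, v in series.items():
--             if v is not None and d.startswith("Q"):
--                 q_counts[d] = q_counts.get(d, 0) + 1
--     valid = {q for q, cnt in q_counts.items() if cnt >= 3}
--     return sorted(valid)
-- ===== SOURCE B (Python) =====
-- def get_display_quarters(financials: dict) -> list[str]:
--     """Return Q-prefixed keys that have at least 3 metrics populated."""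
--     series_list = list(financials.values())
--     quarters = {d for series in series_list
--                 for d, v in series.items()
--                 if v is not None and d.startswith("Q")}
--     return [q for q in sorted(quarters)
--             if sum(1 for series in series_list
--                    if series.get(q) is not None) >= 3]
-- ===== Notes on version B (the rewrite author's own statement) =====
-- stated objective: alternative
-- what changed: Instead of accumulating a per-quarter count dictionary in one pass, B first collects the set of populated Q-keys, sorts it, and then counts populated series per quarter with an inner scan, keeping the sorted quarters whose count is at least 3.
import Mathlib
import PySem

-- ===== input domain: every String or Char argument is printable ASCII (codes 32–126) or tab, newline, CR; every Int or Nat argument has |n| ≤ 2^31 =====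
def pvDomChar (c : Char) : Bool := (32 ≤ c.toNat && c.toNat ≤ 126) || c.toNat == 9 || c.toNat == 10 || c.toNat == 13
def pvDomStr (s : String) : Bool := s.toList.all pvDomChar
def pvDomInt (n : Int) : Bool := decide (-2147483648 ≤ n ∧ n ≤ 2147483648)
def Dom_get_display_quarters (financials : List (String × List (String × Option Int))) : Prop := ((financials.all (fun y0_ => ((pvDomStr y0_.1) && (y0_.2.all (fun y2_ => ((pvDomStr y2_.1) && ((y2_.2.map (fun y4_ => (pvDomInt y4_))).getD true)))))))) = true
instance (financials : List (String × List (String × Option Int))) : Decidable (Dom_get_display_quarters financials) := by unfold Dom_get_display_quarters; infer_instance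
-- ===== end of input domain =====

-- B gathers the set of populated Q-keys first and then counts populated series per quarter
-- with an inner scan, rather than accumulating a per-quarter count dictionary in one pass
-- (objective: alternative decomposition, similar cost).

-- ===== PORT A =====
def get_display_quarters (financials : List (String × List (String × Option Int))) : List String :=
  let qCounts : PySem.Dict String Int :=
    ((PySem.Dict.ofList financials).values).foldl
      (fun qc series =>
        ((PySem.Dict.ofList series).items).foldl
          (fun qc dv =>
            if dv.2.isSome && PySem.Str.startswith dv.1 "Q" then
              qc.modify dv.1 0 (· + 1)
            else qc) qc)
      PySem.Dict.empty
  -- set comprehension over the dict's items: keys are distinct, insertion order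
  let valid : PySem.Set String :=
    (qCounts.items.filter (fun p => decide ((3 : Int) ≤ p.2))).map (·.1)
  PySem.List.sorted valid (fun x => x) false

-- ===== PORT B =====
def get_display_quarters_alt (financials : List (String × List (String × Option Int))) : List String :=
  let seriesList := (PySem.Dict.ofList financials).values
  let quarters : PySem.Set String :=
    PySem.Set.ofList (seriesList.flatMap (fun series =>
      ((PySem.Dict.ofList series).items.filter
        (fun dv => dv.2.isSome && PySem.Str.startswith dv.1 "Q")).map (·.1)))
  (PySem.List.sorted quarters (fun x => x) false).filter
    (fun q => decide (3 ≤ seriesList.countP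
      (fun series => ((PySem.Dict.ofList series).getD q none).isSome)))

-- ===== PRECONDITION & SPEC =====
def Spec_get_display_quarters (financials : List (String × List (String × Option Int))) (out : List String) : Prop := out = get_display_quarters_alt financials
instance (financials : List (String × List (String × Option Int))) (out : List String) : Decidable (Spec_get_display_quarters financials out) := by unfold Spec_get_display_quarters; infer_instance

-- ===== CLAIM (what is proved, stated in full; the proofs are below) =====
def Claim_equal_get_display_quarters : Prop := ∀ (financials : List (String × List (String × Option Int))), Dom_get_display_quarters financials → Spec_get_display_quarters financials (get_display_quarters financials)

-- ===== LEMMAS AND PROOFS =====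

-- the condition both programs test on a (key, value) pair
def pvCond (dv : String × Option Int) : Bool := dv.2.isSome && PySem.Str.startswith dv.1 "Q"

-- the flat list of populated Q-keys, one occurrence per (series, key) hit
def pvL (financials : List (String × List (String × Option Int))) : List String :=
  ((PySem.Dict.ofList financials).values).flatMap (fun series =>
    ((PySem.Dict.ofList series).items.filter pvCond).map (·.1))

-- inner loop of A: fold with an if = fold of the filtered-and-projected list
lemma inner_fold_eq (l : List (String × Option Int)) (qc : PySem.Dict String Int) :
    l.foldl (fun qc dv => if pvCond dv then qc.modify dv.1 0 (· + 1) else qc) qc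
      = ((l.filter pvCond).map (·.1)).foldl (fun qc d => qc.modify d 0 (· + 1)) qc := by
  induction l generalizing qc with
  | nil => rfl
  | cons hd tl ih =>
    by_cases h : pvCond hd <;> simp [h, ih]

-- outer loop over the series list = one fold over the flat list
lemma fold_flatMap {α β γ : Type} (l : List α) (g : α → List β) (step : γ → β → γ) (init : γ) :
    l.foldl (fun acc x => (g x).foldl step acc) init = (l.flatMap g).foldl step init := by
  induction l generalizing init with
  | nil => rfl
  | cons hd tl ih => simp [List.flatMap_cons, List.foldl_append, ih]

-- A's accumulated dict is the counter of pvL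
lemma qcounts_eq_counter (financials : List (String × List (String × Option Int))) :
    ((PySem.Dict.ofList financials).values).foldl
      (fun qc series =>
        ((PySem.Dict.ofList series).items).foldl
          (fun qc dv =>
            if dv.2.isSome && PySem.Str.startswith dv.1 "Q" then
              qc.modify dv.1 0 (· + 1)
            else qc) qc)
      PySem.Dict.empty = PySem.Dict.counter (pvL financials) := by
  rw [PySem.Dict.counter_eq_foldl]
  unfold pvL
  rw [
    ← fold_flatMap ((PySem.Dict.ofList financials).values)
        (fun series => (((PySem.Dict.ofList series).items.filter pvCond).map (·.1)))
        (fun (qc : PySem.Dict String Int) d => qc.modify d 0 (· + 1)) PySem.Dict.empty]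
  apply PySem.List.foldl_congr_mem
  intro qc series _
  exact inner_fold_eq _ qc

-- every element of pvL starts with "Q"
lemma mem_pvL_startswith {financials : List (String × List (String × Option Int))} {q : String}
    (h : q ∈ pvL financials) : PySem.Str.startswith q "Q" = true := by
  simp only [pvL, List.mem_flatMap, List.mem_map, List.mem_filter] at h
  obtain ⟨s, _, dv, ⟨_, hc⟩, rfl⟩ := h
  simp [pvCond] at hc
  exact hc.2

-- a key absent from the item list contributes no occurrence
lemma count_filtered_zero (l : List (String × Option Int)) (q : String)
    (h : q ∉ l.map (·.1)) : ((l.filter pvCond).map (·.1)).count q = 0 := by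
  rw [List.count_eq_zero]
  intro hmem
  apply h
  simp only [List.mem_map, List.mem_filter] at hmem ⊢
  obtain ⟨dv, ⟨hdv, _⟩, rfl⟩ := hmem
  exact ⟨dv, hdv, rfl⟩

-- per item list with distinct keys: occurrences of a Q-key q = 1 iff populated
lemma per_list_count (l : List (String × Option Int)) (hnd : (l.map (·.1)).Nodup) (q : String)
    (hQ : PySem.Str.startswith q "Q" = true) :
    ((l.filter pvCond).map (·.1)).count q
      = (if (((PySem.Dict.mk l).get? q).getD none).isSome then 1 else 0) := by
  induction l with
  | nil => simp [PySem.Dict.get?]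
  | cons hd tl ih =>
    obtain ⟨k, v⟩ := hd
    simp only [List.map_cons, List.nodup_cons] at hnd
    rw [PySem.Dict.get?_mk_cons]
    by_cases hk : k = q
    · subst hk
      have hQ' : PySem.Chars.startswith k.toList ['Q'] = true := by simpa using hQ
      have h0 : ((tl.filter pvCond).map (·.1)).count k = 0 := count_filtered_zero tl k hnd.1
      cases v with
      | some x => simp [pvCond, hQ', h0]
      | none => simp [pvCond, h0]
    · have hb : (k == q) = false := by simp [hk]
      simp only [hb, Bool.false_eq_true, if_false]
      rw [← ih hnd.2]
      by_cases hc : pvCond (k, v) = true <;>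
        simp [hc, hk]

-- per-series: occurrences of a Q-key q in its filtered item keys = 1 iff populated
lemma per_dict_count (d : PySem.Dict String (Option Int)) (hnd : d.keys.Nodup) (q : String)
    (hQ : PySem.Str.startswith q "Q" = true) :
    ((d.items.filter pvCond).map (·.1)).count q
      = (if (d.getD q none).isSome then 1 else 0) := by
  rw [PySem.Dict.getD_eq_get?_getD]
  obtain ⟨l⟩ := d
  exact per_list_count l (by simpa [PySem.Dict.keys] using hnd) q hQ

-- total count in pvL = number of series populated at q
lemma count_pvL (financials : List (String × List (String × Option Int))) (q : String)
    (hQ : PySem.Str.startswith q "Q" = true) :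
    (pvL financials).count q
      = ((PySem.Dict.ofList financials).values).countP
          (fun series => ((PySem.Dict.ofList series).getD q none).isSome) := by
  unfold pvL
  induction (PySem.Dict.ofList financials).values with
  | nil => rfl
  | cons hd tl ih =>
    rw [List.flatMap_cons, List.count_append, List.countP_cons, ih,
      per_dict_count _ (PySem.Dict.nodup_keys_ofList hd) q hQ]
    by_cases h : ((PySem.Dict.ofList hd).getD q none).isSome <;> simp [h] <;> omega

-- A computes sorted(filter-by-count of the key set)
lemma A_eq (financials : List (String × List (String × Option Int))) :
    get_display_quarters financials
      = PySem.List.sorted ((PySem.Set.ofList (pvL financials)).filter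
          (fun k => decide ((3 : Int) ≤ ((pvL financials).count k : Int)))) (fun x => x) false := by
  unfold get_display_quarters
  rw [qcounts_eq_counter]
  simp only [PySem.Dict.items_counter, List.filter_map, List.map_map]
  congr 1
  simp only [Function.comp_def]
  rw [List.map_id'']
  intro x
  rfl

-- B, stated through pvL
lemma B_eq (financials : List (String × List (String × Option Int))) :
    get_display_quarters_alt financials
      = (PySem.List.sorted (PySem.Set.ofList (pvL financials)) (fun x => x) false).filter
          (fun q => decide (3 ≤ ((PySem.Dict.ofList financials).values).countP
            (fun series => ((PySem.Dict.ofList series).getD q none).isSome))) := rfl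

-- sorted of a filtered set = filter of the sorted set (distinct string keys)
lemma sorted_filter_comm (L : List String) (p : String → Bool) :
    PySem.List.sorted ((PySem.Set.ofList L).filter p) (fun x => x) false
      = (PySem.List.sorted (PySem.Set.ofList L) (fun x => x) false).filter p := by
  apply PySem.List.sorted_eq_of_perm_of_pairwise_lt
  · exact (PySem.List.sorted_perm _ _ _).filter p
  · exact (PySem.List.sorted_ofList_pairwise_lt L).filter p

-- ===== VERDICT (by name: the statement is the Claim_ definition above) =====
theorem get_display_quarters_spec : Claim_equal_get_display_quarters := by
  intro financials _
  unfold Spec_get_display_quarters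
  rw [A_eq, B_eq, sorted_filter_comm]
  apply List.filter_congr
  intro q hq
  have hmem : q ∈ pvL financials := by
    simpa [PySem.Set.mem_ofList] using (PySem.List.mem_sorted _ _ _ q).mp hq
  have hQ := mem_pvL_startswith hmem
  rw [← count_pvL financials q hQ]
  simp only [decide_eq_decide]
  omega
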